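-- pv_equiv track=rewrite | github.com/KarolFilipKowalczyk/PRIMO | primo/predicates.py | classification_cells
-- ===== SOURCE A (Python) =====
-- def classification_cells(classifications):
--     """Sort rules into the four (I, Φ) cells.
--
--     Parameters
--     ----------
--     classifications : dict
--         rule_name → (I_positive, Phi_positive)
--
--     Returns
--     -------
--     dict with keys "(I+, Φ+)", "(I+, Φ-)", "(I-, Φ+)", "(I-, Φ-)"
--         Each value is a list of rule names.
--     """
--     cells = {
--         "(I+, Φ+)": [],
--         "(I+, Φ-)": [],
--         "(I-, Φ+)": [],
--         "(I-, Φ-)": [],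
--     }
--     for name, (i_pos, phi_pos) in classifications.items():
--         if i_pos and phi_pos:
--             cells["(I+, Φ+)"].append(name)
--         elif i_pos and not phi_pos:
--             cells["(I+, Φ-)"].append(name)
--         elif not i_pos and phi_pos:
--             cells["(I-, Φ+)"].append(name)
--         else:
--             cells["(I-, Φ-)"].append(name)
--     return cells
-- ===== SOURCE B (Python) =====
-- def classification_cells(classifications):
--     """Sort rules into the four (I, Φ) cells by a two-stage binary partition:
--     split once on I, then split each half on Φ (instead of a four-way branch per item)."""
--     def split(items, pred):
--         yes, no = [], []
--         for it in items:
--             (yes if pred(it) else no).append(it)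
--         return yes, no
--
--     i_plus, i_minus = split(classifications.items(), lambda kv: kv[1][0])
--     pp, pm = split(i_plus, lambda kv: kv[1][1])
--     mp, mm = split(i_minus, lambda kv: kv[1][1])
--     return {
--         "(I+, Φ+)": [n for n, _ in pp],
--         "(I+, Φ-)": [n for n, _ in pm],
--         "(I-, Φ+)": [n for n, _ in mp],
--         "(I-, Φ-)": [n for n, _ in mm],
--     }
-- ===== Notes on version B (the rewrite author's own statement) =====
-- stated objective: alternative
-- what changed: Replaced A's single pass with a four-way if/elif branch per item mutating a pre-seeded dict by a two-stage binary partition: one pass splits items on I, a second stage splits each half on Phi, and the dict is built once at the end from the four partitions.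
import Mathlib
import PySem

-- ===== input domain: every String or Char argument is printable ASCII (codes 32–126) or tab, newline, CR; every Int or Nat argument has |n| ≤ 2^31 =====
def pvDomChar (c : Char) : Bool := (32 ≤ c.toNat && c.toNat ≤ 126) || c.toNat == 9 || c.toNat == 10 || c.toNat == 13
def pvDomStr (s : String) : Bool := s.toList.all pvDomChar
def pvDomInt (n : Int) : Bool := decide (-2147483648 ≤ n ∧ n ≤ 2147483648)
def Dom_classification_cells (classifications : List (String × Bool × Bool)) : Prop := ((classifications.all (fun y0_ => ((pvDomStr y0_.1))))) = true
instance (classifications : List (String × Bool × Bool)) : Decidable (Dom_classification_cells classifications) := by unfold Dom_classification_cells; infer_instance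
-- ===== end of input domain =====

-- ===== PORT A =====
-- B replaces A's per-item four-way if/elif branch mutating a pre-seeded dict by a
-- two-stage binary partition (split on I, then split each half on Φ), building the
-- result dict once at the end; return values are equal (objective: alternative).
-- A-side helper: the loop body of A's for-loop (the if/elif chain), as its own definition
def cellsStep (cells : PySem.Dict String (List String)) (x : String × Bool × Bool) :
    PySem.Dict String (List String) :=
  let name := x.1
  let i_pos := x.2.1
  let phi_pos := x.2.2
  if i_pos && phi_pos then cells.modify "(I+, Φ+)" [] (fun l => l ++ [name])
  else if i_pos && !phi_pos then cells.modify "(I+, Φ-)" [] (fun l => l ++ [name])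
  else if !i_pos && phi_pos then cells.modify "(I-, Φ+)" [] (fun l => l ++ [name])
  else cells.modify "(I-, Φ-)" [] (fun l => l ++ [name])

def classification_cells (classifications : List (String × Bool × Bool)) : List (String × List String) :=
  let cells : PySem.Dict String (List String) :=
    PySem.Dict.mk [("(I+, Φ+)", []), ("(I+, Φ-)", []), ("(I-, Φ+)", []), ("(I-, Φ-)", [])]
  (classifications.foldl cellsStep cells).items

-- ===== PORT B =====
-- B-side helper: the inner 'split' of Source B (one pass appending to 'yes' or 'no')
def splitCells {α : Type} (items : List α) (pred : α → Bool) : List α × List α :=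
  items.foldl
    (fun acc it => if pred it then (acc.1 ++ [it], acc.2) else (acc.1, acc.2 ++ [it]))
    ([], [])

def classification_cells_alt (classifications : List (String × Bool × Bool)) : List (String × List String) :=
  let s1 := splitCells classifications (fun kv => kv.2.1)
  let top := splitCells s1.1 (fun kv => kv.2.2)
  let bot := splitCells s1.2 (fun kv => kv.2.2)
  [("(I+, Φ+)", top.1.map (·.1)), ("(I+, Φ-)", top.2.map (·.1)),
   ("(I-, Φ+)", bot.1.map (·.1)), ("(I-, Φ-)", bot.2.map (·.1))]

-- ===== PRECONDITION & SPEC =====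
def Spec_classification_cells (classifications : List (String × Bool × Bool)) (out : List (String × List String)) : Prop := out = classification_cells_alt classifications
instance (classifications : List (String × Bool × Bool)) (out : List (String × List String)) : Decidable (Spec_classification_cells classifications out) := by unfold Spec_classification_cells; infer_instance

-- ===== CLAIM (what is proved, stated in full; the proofs are below) =====
def Claim_equal_classification_cells : Prop := ∀ (classifications : List (String × Bool × Bool)), Dom_classification_cells classifications → Spec_classification_cells classifications (classification_cells classifications)

-- ===== LEMMAS AND PROOFS =====
lemma modCell1 (a1 a2 a3 a4 : List String) (f : List String → List String) :
    (PySem.Dict.mk [("(I+, Φ+)", a1), ("(I+, Φ-)", a2), ("(I-, Φ+)", a3), ("(I-, Φ-)", a4)]).modify "(I+, Φ+)" [] f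
    = PySem.Dict.mk [("(I+, Φ+)", f a1), ("(I+, Φ-)", a2), ("(I-, Φ+)", a3), ("(I-, Φ-)", a4)] := by
  simp [PySem.Dict.modify, PySem.Dict.insert, PySem.Dict.getD, PySem.Dict.get?, PySem.Dict.contains]

lemma modCell2 (a1 a2 a3 a4 : List String) (f : List String → List String) :
    (PySem.Dict.mk [("(I+, Φ+)", a1), ("(I+, Φ-)", a2), ("(I-, Φ+)", a3), ("(I-, Φ-)", a4)]).modify "(I+, Φ-)" [] f
    = PySem.Dict.mk [("(I+, Φ+)", a1), ("(I+, Φ-)", f a2), ("(I-, Φ+)", a3), ("(I-, Φ-)", a4)] := by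
  simp [PySem.Dict.modify, PySem.Dict.insert, PySem.Dict.getD, PySem.Dict.get?, PySem.Dict.contains]

lemma modCell3 (a1 a2 a3 a4 : List String) (f : List String → List String) :
    (PySem.Dict.mk [("(I+, Φ+)", a1), ("(I+, Φ-)", a2), ("(I-, Φ+)", a3), ("(I-, Φ-)", a4)]).modify "(I-, Φ+)" [] f
    = PySem.Dict.mk [("(I+, Φ+)", a1), ("(I+, Φ-)", a2), ("(I-, Φ+)", f a3), ("(I-, Φ-)", a4)] := by
  simp [PySem.Dict.modify, PySem.Dict.insert, PySem.Dict.getD, PySem.Dict.get?, PySem.Dict.contains]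

lemma modCell4 (a1 a2 a3 a4 : List String) (f : List String → List String) :
    (PySem.Dict.mk [("(I+, Φ+)", a1), ("(I+, Φ-)", a2), ("(I-, Φ+)", a3), ("(I-, Φ-)", a4)]).modify "(I-, Φ-)" [] f
    = PySem.Dict.mk [("(I+, Φ+)", a1), ("(I+, Φ-)", a2), ("(I-, Φ+)", a3), ("(I-, Φ-)", f a4)] := by
  simp [PySem.Dict.modify, PySem.Dict.insert, PySem.Dict.getD, PySem.Dict.get?, PySem.Dict.contains]

lemma cells_loop (xs : List (String × Bool × Bool)) (a1 a2 a3 a4 : List String) :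
    xs.foldl cellsStep
      (PySem.Dict.mk [("(I+, Φ+)", a1), ("(I+, Φ-)", a2), ("(I-, Φ+)", a3), ("(I-, Φ-)", a4)])
    = PySem.Dict.mk
      [("(I+, Φ+)", a1 ++ (xs.filter (fun x => x.2.1 && x.2.2)).map (·.1)),
       ("(I+, Φ-)", a2 ++ (xs.filter (fun x => x.2.1 && !x.2.2)).map (·.1)),
       ("(I-, Φ+)", a3 ++ (xs.filter (fun x => !x.2.1 && x.2.2)).map (·.1)),
       ("(I-, Φ-)", a4 ++ (xs.filter (fun x => !x.2.1 && !x.2.2)).map (·.1))] := by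
  induction xs generalizing a1 a2 a3 a4 with
  | nil => simp
  | cons hd tl ih =>
    obtain ⟨n, i, p⟩ := hd
    cases i <;> cases p <;>
      simp only [List.foldl_cons, cellsStep, Bool.and_self, Bool.and_true, Bool.and_false,
        Bool.not_true, Bool.not_false, Bool.true_and, Bool.false_and, Bool.false_eq_true,
        ite_true, ite_false, if_true, if_false, modCell1, modCell2, modCell3, modCell4] <;>
      rw [ih] <;> simp [List.filter_cons]

lemma splitCells_go {α : Type} (xs : List α) (p : α → Bool) (a b : List α) :
    xs.foldl
      (fun acc it => if p it then (acc.1 ++ [it], acc.2) else (acc.1, acc.2 ++ [it]))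
      (a, b)
    = (a ++ xs.filter p, b ++ xs.filter (fun x => !p x)) := by
  induction xs generalizing a b with
  | nil => simp
  | cons hd tl ih =>
    by_cases h : p hd = true <;> simp [h, ih]

lemma splitCells_eq {α : Type} (xs : List α) (p : α → Bool) :
    splitCells xs p = (xs.filter p, xs.filter (fun x => !p x)) := by
  simpa using splitCells_go xs p [] []

-- ===== VERDICT (by name: the statement is the Claim_ definition above) =====
theorem classification_cells_spec : Claim_equal_classification_cells := by
  intro cs _
  show classification_cells cs = classification_cells_alt cs
  simp only [classification_cells, classification_cells_alt, splitCells_eq]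
  rw [cells_loop]
  simp [List.filter_filter, Bool.and_comm]
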